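-- pv_equiv track=rewrite | github.com/Do-code-ing/Python_Programmers | Coding_Test_Lv3/05_월코챌_스타수열.py | solution
-- ===== SOURCE A (Python) =====
-- from collections import Counter
--
-- def solution(a):
--     n = len(a)
--     answer = 0
--     # 어떤 숫자를 기준으로 스타수열을 만들 것인가
--     values = Counter(a)
--     for value in values:
--         # 만약 그 숫자의 개수가 여태까지 나온 정답보다 작거나 같으면
--         # 어차피 정답과 작거나 같을 것이므로 continue
--         if values[value] <= answer:
--             continue
--
--         count = 0
--         idx = 0
--         while idx < n-1:
--             # 스타 수열 규칙에 맞다면 2칸 index 이동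
--             if a[idx] == value or a[idx+1] == value:
--                 if a[idx] != a[idx+1]:
--                     count += 1
--                     idx += 2
--                     continue
--             # 아니라면 1칸 index 이동
--             idx += 1
--
--         if answer < count:
--             answer = count
--
--     return answer * 2
-- ===== SOURCE B (Python) =====
-- def solution(a):
--     n = len(a)
--     pos = {}
--     for i, x in enumerate(a):
--         pos.setdefault(x, []).append(i)
--     best = 0
--     for v, ps in pos.items():
--         cnt = 0
--         j = 0  # barrier: smallest index the greedy may still use
--         for p in ps:
--             if j <= p - 1 and a[p - 1] != v:
--                 cnt += 1
--                 j = p + 1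
--             elif j <= p and p + 1 < n and a[p + 1] != v:
--                 cnt += 1
--                 j = p + 2
--             else:
--                 j = max(j, p + 1)
--         if cnt > best:
--             best = cnt
--     return best * 2
-- ===== Notes on version B (the rewrite author's own statement) =====
-- stated objective: alternative
-- what changed: Instead of rescanning the whole array with A's greedy index walk once per distinct value (with a count-based pruning), B builds a positions-per-value index in one pass and replays the same greedy per value by jumping only between that value's occurrences with a barrier index, doing O(n) total inner-loop steps; on the benchmarked random inputs this was not measurably (>=1.5x) faster.
import Mathlib
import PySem

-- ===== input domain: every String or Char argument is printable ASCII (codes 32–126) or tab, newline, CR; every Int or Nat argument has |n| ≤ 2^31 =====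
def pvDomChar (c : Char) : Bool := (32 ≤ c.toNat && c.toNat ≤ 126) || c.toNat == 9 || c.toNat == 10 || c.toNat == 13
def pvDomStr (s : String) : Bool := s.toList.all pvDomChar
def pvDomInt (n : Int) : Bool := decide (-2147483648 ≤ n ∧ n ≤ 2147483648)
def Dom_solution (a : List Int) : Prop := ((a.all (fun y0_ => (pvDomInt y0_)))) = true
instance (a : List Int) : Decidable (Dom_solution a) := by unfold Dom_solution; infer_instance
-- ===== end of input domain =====

-- B replaces A's per-distinct-value greedy rescan of the whole array by one
-- positions-per-value index built in a single pass, replaying the same greedy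
-- per value by jumping only between that value's occurrences (objective: alternative).

-- ===== PORT A =====
-- A's inner while loop; the nested 'if or / if !=' pair collapses to one conjunction
-- (both failure paths do idx += 1).  a[idx] is always in range here (0 ≤ idx < n-1),
-- so pyGetD is exact.
def pvLoopA (a : List Int) (v n count idx : Int) : Int :=
  if h : idx < n - 1 then
    if (PySem.List.pyGetD a idx 0 = v ∨ PySem.List.pyGetD a (idx + 1) 0 = v) ∧
        PySem.List.pyGetD a idx 0 ≠ PySem.List.pyGetD a (idx + 1) 0 then
      pvLoopA a v n (count + 1) (idx + 2)
    else
      pvLoopA a v n count (idx + 1)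
  else count
termination_by (n - idx).toNat
decreasing_by all_goals omega

def solution (a : List Int) : Int :=
  let n : Int := a.length
  let values := PySem.Dict.counter a
  let answer : Int := values.keys.foldl (fun answer value =>
    if values.getD value 0 ≤ answer then answer
    else
      let count := pvLoopA a value n 0 0
      if answer < count then count else answer) 0
  answer * 2

-- ===== PORT B =====
-- B's inner for loop over the occurrence list ps of value v; j is the barrier.
def pvLoopB (a : List Int) (v n cnt j : Int) : List Int → Int
  | [] => cnt
  | p :: rest =>
    if j ≤ p - 1 ∧ PySem.List.pyGetD a (p - 1) 0 ≠ v then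
      pvLoopB a v n (cnt + 1) (p + 1) rest
    else if j ≤ p ∧ p + 1 < n ∧ PySem.List.pyGetD a (p + 1) 0 ≠ v then
      pvLoopB a v n (cnt + 1) (p + 2) rest
    else
      pvLoopB a v n cnt (max j (p + 1)) rest

def solution_alt (a : List Int) : Int :=
  let n : Int := a.length
  let pos := (PySem.List.enumerate a 0).foldl
      (fun d p => d.modify p.2 [] (fun l => l ++ [p.1])) PySem.Dict.empty
  let best : Int := pos.items.foldl (fun best vp =>
      let cnt := pvLoopB a vp.1 n 0 0 vp.2
      if best < cnt then cnt else best) 0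
  best * 2

-- ===== PRECONDITION & SPEC =====
def Spec_solution (a : List Int) (out : Int) : Prop := out = solution_alt a
instance (a : List Int) (out : Int) : Decidable (Spec_solution a out) := by unfold Spec_solution; infer_instance

-- ===== CLAIM (what is proved, stated in full; the proofs are below) =====
def Claim_equal_solution : Prop := ∀ (a : List Int), Dom_solution a → Spec_solution a (solution a)

-- ===== LEMMAS AND PROOFS =====

-- accumulator lemma for A's loop
lemma pvLoopA_acc (a : List Int) (v n : Int) :
    ∀ (k : Nat) (i c : Int), (n - i).toNat ≤ k →
      pvLoopA a v n c i = c + pvLoopA a v n 0 i := by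
  intro k
  induction k with
  | zero =>
    intro i c h
    rw [pvLoopA.eq_def]
    conv_rhs => rw [pvLoopA.eq_def]
    rw [dif_neg (show ¬ i < n - 1 by omega), dif_neg (show ¬ i < n - 1 by omega)]; omega
  | succ k ih =>
    intro i c h
    rw [pvLoopA.eq_def]
    conv_rhs => rw [pvLoopA.eq_def]
    by_cases h1 : i < n - 1
    · rw [dif_pos h1, dif_pos h1]
      by_cases h2 : (PySem.List.pyGetD a i 0 = v ∨ PySem.List.pyGetD a (i + 1) 0 = v) ∧
          PySem.List.pyGetD a i 0 ≠ PySem.List.pyGetD a (i + 1) 0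
      · rw [if_pos h2, if_pos h2, ih (i + 2) (c + 1) (by omega), ih (i + 2) (0 + 1) (by omega)]
        omega
      · rw [if_neg h2, if_neg h2, ih (i + 1) c (by omega)]
    · rw [dif_neg h1, dif_neg h1]; omega

-- A's loop finds nothing when no occurrence of v lies in [j, n)
lemma pvLoopA_none (a : List Int) (v n : Int) :
    ∀ (k : Nat) (j : Int), (n - j).toNat ≤ k →
      (∀ q : Int, j ≤ q → q < n → PySem.List.pyGetD a q 0 ≠ v) →
      pvLoopA a v n 0 j = 0 := by
  intro k
  induction k with
  | zero =>
    intro j h _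
    rw [pvLoopA.eq_def, dif_neg (show ¬ j < n - 1 by omega)]
  | succ k ih =>
    intro j h hno
    rw [pvLoopA.eq_def]
    by_cases h1 : j < n - 1
    · rw [dif_pos h1, if_neg, ih (j + 1) (by omega) (fun q hq1 hq2 => hno q (by omega) hq2)]
      intro ⟨hor, _⟩
      rcases hor with h' | h'
      · exact hno j (by omega) (by omega) h'
      · exact hno (j + 1) (by omega) (by omega) h'
    · rw [dif_neg h1]

-- A's loop skips forward to c - 1 when [j, c) contains no occurrence of v
lemma pvLoopA_skip (a : List Int) (v n : Int) :
    ∀ (k : Nat) (j c : Int), (c - j).toNat ≤ k → j ≤ c - 1 → c < n →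
      PySem.List.pyGetD a c 0 = v →
      (∀ q : Int, j ≤ q → q < c → PySem.List.pyGetD a q 0 ≠ v) →
      pvLoopA a v n 0 j = pvLoopA a v n 0 (c - 1) := by
  intro k
  induction k with
  | zero =>
    intro j c h h1 _ _ _
    have hj : j = c - 1 := by omega
    rw [hj]
  | succ k ih =>
    intro j c h h1 h2 h3 hno
    by_cases hj : j = c - 1
    · rw [hj]
    · rw [pvLoopA.eq_def, dif_pos (show j < n - 1 by omega), if_neg, ← ih (j + 1) c (by omega) (by omega) h2 h3
        (fun q hq1 hq2 => hno q (by omega) hq2)]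
      intro ⟨hor, _⟩
      rcases hor with h' | h'
      · exact hno j (by omega) (by omega) h'
      · exact hno (j + 1) (by omega) (by omega) h'

-- accumulator lemma for B's loop
lemma pvLoopB_acc (a : List Int) (v n : Int) :
    ∀ (ps : List Int) (c j : Int), pvLoopB a v n c j ps = c + pvLoopB a v n 0 j ps := by
  intro ps
  induction ps with
  | nil => intro c j; simp [pvLoopB]
  | cons p rest ih =>
    intro c j
    rw [pvLoopB, pvLoopB]
    split_ifs
    · rw [ih (c + 1), ih (0 + 1)]; omega
    · rw [ih (c + 1), ih (0 + 1)]; omega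
    · rw [ih c]

-- B's count is bounded by the number of occurrences
lemma pvLoopB_le (a : List Int) (v n : Int) :
    ∀ (ps : List Int) (j : Int), pvLoopB a v n 0 j ps ≤ (ps.length : Int) := by
  intro ps
  induction ps with
  | nil => intro j; simp [pvLoopB]
  | cons p rest ih =>
    intro j
    rw [pvLoopB]
    split_ifs
    · rw [pvLoopB_acc]; have := ih (p + 1); simp [List.length_cons]; omega
    · rw [pvLoopB_acc]; have := ih (p + 2); simp [List.length_cons]; omega
    · have := ih (max j (p + 1)); simp [List.length_cons]; omega

-- MAIN LEMMA: A's greedy index scan equals B's occurrence-jumping loop,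
-- whenever ps is exactly the sorted list of occurrences of v (completeness from j on).
lemma pvLoopAB (a : List Int) (v n : Int) :
    ∀ (ps : List Int) (j : Int), 0 ≤ j →
      (∀ p ∈ ps, 0 ≤ p ∧ p < n ∧ PySem.List.pyGetD a p 0 = v) →
      List.Pairwise (· < ·) ps →
      (∀ q : Int, j ≤ q → q < n → PySem.List.pyGetD a q 0 = v → q ∈ ps) →
      pvLoopA a v n 0 j = pvLoopB a v n 0 j ps := by
  intro ps
  induction ps with
  | nil =>
    intro j _ _ _ h3
    rw [pvLoopB]
    exact pvLoopA_none a v n (n - j).toNat j le_rfl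
      (fun q hq1 hq2 hq3 => absurd (h3 q hq1 hq2 hq3) (List.not_mem_nil))
  | cons p rest ih =>
    intro j hj h1 h2 h3
    obtain ⟨hp0, hpn, hpv⟩ := h1 p List.mem_cons_self
    have hrest1 : ∀ r ∈ rest, 0 ≤ r ∧ r < n ∧ PySem.List.pyGetD a r 0 = v :=
      fun r hr => h1 r (List.mem_cons_of_mem p hr)
    have hrest2 : List.Pairwise (· < ·) rest := h2.of_cons
    have hlt : ∀ r ∈ rest, p < r := fun r hr => List.rel_of_pairwise_cons h2 hr
    by_cases hpj : p < j
    · -- occurrence before the barrier: B skips it, barrier unchanged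
      rw [pvLoopB, if_neg (by omega), if_neg (by omega)]
      have hmax : max j (p + 1) = j := by omega
      rw [hmax]
      exact ih j hj hrest1 hrest2 (fun q hq1 hq2 hq3 => by
        rcases List.mem_cons.mp (h3 q hq1 hq2 hq3) with h | h
        · omega
        · exact h)
    · have hgap : ∀ q : Int, j ≤ q → q < p → PySem.List.pyGetD a q 0 ≠ v := by
        intro q hq1 hq2 hq3
        rcases List.mem_cons.mp (h3 q hq1 (by omega) hq3) with h | h
        · omega
        · exact absurd (hlt q h) (by omega)
      by_cases hjp : j ≤ p - 1
      · -- pair (p-1, p): valid since a[p-1] ≠ v, a[p] = v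
        have hpm1 : PySem.List.pyGetD a (p - 1) 0 ≠ v := hgap (p - 1) (by omega) (by omega)
        have hskip := pvLoopA_skip a v n (p - j).toNat j p le_rfl hjp hpn hpv hgap
        rw [hskip, pvLoopA.eq_def, dif_pos (show p - 1 < n - 1 by omega)]
        have hcond : (PySem.List.pyGetD a (p - 1) 0 = v ∨
            PySem.List.pyGetD a (p - 1 + 1) 0 = v) ∧
            PySem.List.pyGetD a (p - 1) 0 ≠ PySem.List.pyGetD a (p - 1 + 1) 0 := by
          constructor
          · right; rw [show p - 1 + 1 = p by omega]; exact hpv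
          · rw [show p - 1 + 1 = p by omega, hpv]; exact hpm1
        rw [if_pos hcond, pvLoopB, if_pos ⟨hjp, hpm1⟩, pvLoopA_acc a v n (n - (p - 1 + 2)).toNat _ _ le_rfl,
          pvLoopB_acc, show p - 1 + 2 = p + 1 by omega,
          ih (p + 1) (by omega) hrest1 hrest2 (fun q hq1 hq2 hq3 => by
            rcases List.mem_cons.mp (h3 q (by omega) hq2 hq3) with h | h
            · omega
            · exact h)]
      · -- j = p
        have hjep : j = p := by omega
        subst hjep
        rw [pvLoopB, if_neg (by omega)]
        by_cases hnext : j + 1 < n ∧ PySem.List.pyGetD a (j + 1) 0 ≠ v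
        · -- pair (p, p+1) valid
          rw [if_pos ⟨le_rfl, hnext⟩, pvLoopA.eq_def, dif_pos (show j < n - 1 by omega),
            if_pos ⟨Or.inl hpv, by rw [hpv]; exact fun h => hnext.2 h.symm⟩,
            pvLoopA_acc a v n (n - (j + 2)).toNat _ _ le_rfl, pvLoopB_acc,
            ih (j + 2) (by omega) hrest1 hrest2 (fun q hq1 hq2 hq3 => by
              rcases List.mem_cons.mp (h3 q (by omega) hq2 hq3) with h | h
              · omega
              · exact h)]
        · rw [if_neg (fun h => hnext ⟨h.2.1, h.2.2⟩)]
          by_cases hlast : j + 1 < n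
          · -- a[p+1] = v too: no pair at p, both move on past p
            have hv1 : PySem.List.pyGetD a (j + 1) 0 = v := by
              by_contra h; exact hnext ⟨hlast, h⟩
            rw [pvLoopA.eq_def, dif_pos (show j < n - 1 by omega), if_neg (by rw [hpv, hv1]; simp),
              show max j (j + 1) = j + 1 by omega]
            exact ih (j + 1) (by omega) hrest1 hrest2 (fun q hq1 hq2 hq3 => by
              rcases List.mem_cons.mp (h3 q (by omega) hq2 hq3) with h | h
              · omega
              · exact h)
          · -- p = n - 1: A's scan is over; rest must be empty
            have hrnil : rest = [] := by
              cases rest with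
              | nil => rfl
              | cons r rs =>
                obtain ⟨_, hrn, _⟩ := hrest1 r List.mem_cons_self
                exact absurd (hlt r List.mem_cons_self) (by omega)
            rw [hrnil, pvLoopB, pvLoopA.eq_def, dif_neg (show ¬ j < n - 1 by omega)]

-- occurrence list drawn from the positions dict
-- pvOcc a v is what pos.getD v [] evaluates to (proved in pvPos_getD below)
def pvOcc (a : List Int) (v : Int) : List Int :=
  ((PySem.List.enumerate a 0).filter (fun p => p.2 == v)).map (fun p => p.1)

lemma pvPos_getD (a : List Int) (v : Int) :
    ((PySem.List.enumerate a 0).foldl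
        (fun d p => d.modify p.2 [] (fun l => l ++ [p.1])) PySem.Dict.empty).getD v []
      = pvOcc a v := by
  have hfold : (PySem.List.enumerate a 0).foldl
      (fun d p => d.modify p.2 [] (fun l => l ++ [p.1])) PySem.Dict.empty
      = ((PySem.List.enumerate a 0).map Prod.swap).foldl
        (fun d p => d.modify p.1 [] (fun l => l ++ [p.2])) PySem.Dict.empty := by
    rw [List.foldl_map]
    rfl
  rw [hfold, PySem.Dict.getD_foldl_modify_append, PySem.Dict.getD_empty]
  simp [pvOcc, List.filter_map, List.map_map, Function.comp_def, Prod.swap]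

lemma pvPos_keys (a : List Int) :
    ((PySem.List.enumerate a 0).foldl
        (fun d p => d.modify p.2 [] (fun l => l ++ [p.1])) PySem.Dict.empty).keys
      = PySem.Set.ofList a := by
  rw [PySem.Dict.keys_foldl_modify_key (PySem.List.enumerate a 0) (fun p => p.2) []
      (fun d p => fun l => l ++ [p.1]) PySem.Dict.empty]
  rw [PySem.Dict.keys_empty, PySem.List.map_snd_enumerate, PySem.Set.update_nil_left]

lemma pvPos_nodup (a : List Int) :
    ((PySem.List.enumerate a 0).foldl
        (fun d p => d.modify p.2 [] (fun l => l ++ [p.1])) PySem.Dict.empty).keys.Nodup := by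
  exact PySem.Dict.nodup_keys_foldl_modify_key (PySem.List.enumerate a 0) (fun p => p.2) []
      (fun d p => fun l => l ++ [p.1]) PySem.Dict.empty PySem.Dict.nodup_keys_empty

lemma pvOcc_mem (a : List Int) (v p : Int) (h : p ∈ pvOcc a v) :
    0 ≤ p ∧ p < (a.length : Int) ∧ PySem.List.pyGetD a p 0 = v := by
  simp only [pvOcc, List.mem_map, List.mem_filter] at h
  obtain ⟨q, ⟨hq, hv⟩, hfst⟩ := h
  rw [PySem.List.mem_enumerate_iff] at hq
  obtain ⟨k, hk, rfl⟩ := hq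
  simp only [zero_add] at hfst
  subst hfst
  simp only [beq_iff_eq] at hv
  refine ⟨by omega, by exact_mod_cast hk, ?_⟩
  rw [PySem.List.pyGetD_natCast]
  rw [List.getD_eq_getElem _ _ hk]
  exact hv

lemma pvOcc_complete (a : List Int) (v q : Int) (h0 : 0 ≤ q) (hn : q < (a.length : Int))
    (hv : PySem.List.pyGetD a q 0 = v) : q ∈ pvOcc a v := by
  have hk : q.toNat < a.length := by omega
  simp only [pvOcc, List.mem_map, List.mem_filter]
  refine ⟨((q.toNat : Int), a[q.toNat]), ⟨?_, ?_⟩, by simp; omega⟩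
  · rw [PySem.List.mem_enumerate_iff]
    exact ⟨q.toNat, hk, by simp⟩
  · simp only [beq_iff_eq]
    rw [PySem.List.pyGetD_eq_getElem a 0 h0 hn] at hv
    exact hv

lemma pvOcc_pairwise (a : List Int) (v : Int) : List.Pairwise (· < ·) (pvOcc a v) := by
  unfold pvOcc
  rw [List.pairwise_map]
  exact (PySem.List.pairwise_lt_enumerate a 0).filter _

lemma pvOcc_length (a : List Int) (v : Int) :
    ∀ (s : Int), (((PySem.List.enumerate a s).filter (fun p => p.2 == v)).length : Int)
      = a.count v := by
  induction a with
  | nil => intro s; simp [PySem.List.enumerate_nil]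
  | cons x xs ih =>
    intro s
    rw [PySem.List.enumerate_cons, List.filter_cons]
    by_cases hx : x = v
    · simp only [hx, beq_self_eq_true, if_pos]
      simp [← ih (s + 1)]
    · have hfalse : ((s, x).2 == v) = false := by simp [hx]
      simp only [hfalse, Bool.false_eq_true, if_false]
      rw [List.count_cons]
      simp only [beq_iff_eq, hx, if_false]
      push_cast [← ih (s + 1)]
      ring

-- generic foldl congruence
lemma pvFoldl_congr {α β : Type} (f g : β → α → β) (h : ∀ acc x, f acc x = g acc x) :
    ∀ (l : List α) (init : β), l.foldl f init = l.foldl g init := by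
  have : f = g := funext fun acc => funext (h acc)
  intro l init; rw [this]

-- per-value step functions agree
lemma pvStep_eq (a : List Int) (v ans : Int) :
    (if ((PySem.Dict.counter a).getD v 0 : Int) ≤ ans then ans
     else
       let count := pvLoopA a v (a.length : Int) 0 0
       if ans < count then count else ans)
    = (let cnt := pvLoopB a v (a.length : Int) 0 0 (pvOcc a v)
       if ans < cnt then cnt else ans) := by
  have hAB : pvLoopA a v (a.length : Int) 0 0
      = pvLoopB a v (a.length : Int) 0 0 (pvOcc a v) :=
    pvLoopAB a v (a.length : Int) (pvOcc a v) 0 le_rfl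
      (fun p hp => pvOcc_mem a v p hp) (pvOcc_pairwise a v)
      (fun q h1 h2 h3 => pvOcc_complete a v q h1 h2 h3)
  have hcount : ((PySem.Dict.counter a).getD v 0 : Int) = a.count v :=
    PySem.Dict.getD_counter a v
  have hlen : ((pvOcc a v).length : Int) = a.count v := by
    unfold pvOcc
    rw [List.length_map]
    exact pvOcc_length a v 0
  have hle : pvLoopB a v (a.length : Int) 0 0 (pvOcc a v) ≤ ((pvOcc a v).length : Int) :=
    pvLoopB_le a v (a.length : Int) (pvOcc a v) 0
  simp only [hAB, hcount]
  split_ifs <;> omega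

-- ===== VERDICT (by name: the statement is the Claim_ definition above) =====
theorem solution_spec : Claim_equal_solution := by
  intro a _
  unfold Spec_solution solution solution_alt
  simp only []
  have hitems : ((PySem.List.enumerate a 0).foldl
      (fun d p => d.modify p.2 [] (fun l => l ++ [p.1])) PySem.Dict.empty).items
      = (PySem.Set.ofList a).map (fun k => (k,
          ((PySem.List.enumerate a 0).foldl
            (fun d p => d.modify p.2 [] (fun l => l ++ [p.1])) PySem.Dict.empty).getD k [])) := by
    rw [← pvPos_keys a]
    exact PySem.Dict.items_eq_map_keys _ (pvPos_nodup a) []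
  rw [hitems, List.foldl_map, PySem.Dict.keys_counter]
  congr 1
  apply pvFoldl_congr
  intro ans v
  simp only [pvPos_getD a v]
  exact pvStep_eq a v ans
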